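-- pv_equiv track=rewrite | github.com/Ricman1029/AED2024 | Guia09/G09_Ej4.py | validar_dni
-- ===== SOURCE A (Python) =====
-- def validar_dni(cadena):
--     if len(cadena) != 10:
--         return False
--
--     posicion = 1
--     for caracter in cadena:
--         if posicion == 3 or posicion == 7:
--             if caracter != ".":
--                 return False
--         else:
--             if not caracter.isdigit():
--                 return False
--
--         posicion += 1
--
--     return True
-- ===== SOURCE B (Python) =====
-- def validar_dni(cadena):
--     return (len(cadena) == 10
--             and cadena[2] == "."
--             and cadena[6] == "."
--             and cadena[:2].isdigit()
--             and cadena[3:6].isdigit()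
--             and cadena[7:].isdigit())
-- ===== Notes on version B (the rewrite author's own statement) =====
-- stated objective: simpler
-- what changed: Replaced the per-character loop with a position counter by a single boolean expression of fixed-offset checks: dots at indices 2 and 6 and the three sliced digit groups tested with isdigit.
import Mathlib
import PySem

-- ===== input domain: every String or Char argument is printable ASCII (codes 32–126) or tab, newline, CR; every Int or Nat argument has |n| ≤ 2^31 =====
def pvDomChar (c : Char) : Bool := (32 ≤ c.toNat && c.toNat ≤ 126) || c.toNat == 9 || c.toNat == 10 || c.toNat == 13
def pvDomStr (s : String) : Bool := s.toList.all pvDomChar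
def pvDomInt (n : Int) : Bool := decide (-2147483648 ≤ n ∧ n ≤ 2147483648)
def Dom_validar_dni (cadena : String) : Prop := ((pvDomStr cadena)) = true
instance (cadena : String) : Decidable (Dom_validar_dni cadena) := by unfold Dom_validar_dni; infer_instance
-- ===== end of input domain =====

-- B replaces A's per-character loop with one boolean expression of fixed-offset checks (objective: simpler).


-- ===== PORT A =====
-- the for-loop with its 'posicion' counter and early returns, as structural recursion
def validarLoopA : List Char → Nat → Bool
  | [], _ => true
  | c :: rest, posicion =>
    if posicion = 3 ∨ posicion = 7 then
      if c ≠ '.' then false else validarLoopA rest (posicion + 1)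
    else
      if ¬ (PySem.Chars.isdigit c) then false else validarLoopA rest (posicion + 1)

def validar_dni (cadena : String) : Bool :=
  if PySem.Str.len cadena ≠ 10 then false
  else validarLoopA cadena.toList 1

-- ===== PORT B =====
def validar_dni_alt (cadena : String) : Bool :=
  (PySem.Str.len cadena == 10)
  && (PySem.Str.pyGet? cadena 2 == some '.')
  && (PySem.Str.pyGet? cadena 6 == some '.')
  && PySem.Chars.strIsdigit (PySem.List.slice cadena.toList none (some 2))
  && PySem.Chars.strIsdigit (PySem.List.slice cadena.toList (some 3) (some 6))
  && PySem.Chars.strIsdigit (PySem.List.slice cadena.toList (some 7) none)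

-- ===== PRECONDITION & SPEC =====
def Spec_validar_dni (cadena : String) (out : Bool) : Prop := out = validar_dni_alt cadena
instance (cadena : String) (out : Bool) : Decidable (Spec_validar_dni cadena out) := by unfold Spec_validar_dni; infer_instance

-- ===== CLAIM (what is proved, stated in full; the proofs are below) =====
def Claim_equal_validar_dni : Prop := ∀ (cadena : String), Dom_validar_dni cadena → Spec_validar_dni cadena (validar_dni cadena)

-- ===== LEMMAS AND PROOFS =====

theorem len10_shape (cs : List Char) (h : cs.length = 10) :
    ∃ a b c d e f g h' i j, cs = [a,b,c,d,e,f,g,h',i,j] := by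
  rcases cs with _ | ⟨a, cs⟩ <;> try simp at h
  rcases cs with _ | ⟨b, cs⟩ <;> try simp at h
  rcases cs with _ | ⟨c, cs⟩ <;> try simp at h
  rcases cs with _ | ⟨d, cs⟩ <;> try simp at h
  rcases cs with _ | ⟨e, cs⟩ <;> try simp at h
  rcases cs with _ | ⟨f, cs⟩ <;> try simp at h
  rcases cs with _ | ⟨g, cs⟩ <;> try simp at h
  rcases cs with _ | ⟨h', cs⟩ <;> try simp at h
  rcases cs with _ | ⟨i, cs⟩ <;> try simp at h
  rcases cs with _ | ⟨j, cs⟩ <;> try simp at h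
  obtain rfl : cs = [] := by simpa using h
  exact ⟨a,b,c,d,e,f,g,h',i,j,rfl⟩

-- ===== VERDICT (by name: the statement is the Claim_ definition above) =====
theorem validar_dni_spec : Claim_equal_validar_dni := by
  intro s _
  unfold Spec_validar_dni validar_dni validar_dni_alt
  by_cases hlen : PySem.Str.len s = 10
  · have hL : s.toList.length = 10 := by
      have := PySem.Str.len_eq s
      omega
    obtain ⟨a,b,c,d,e,f,g,h',i,j, hcs⟩ := len10_shape s.toList hL
    simp [hcs, PySem.Str.len, validarLoopA, PySem.Chars.strIsdigit,
      PySem.List.slice, PySem.List.clampIdx, Bool.and_assoc, Bool.and_comm, Bool.and_left_comm]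
    rw [show (c == '.') = decide (c = '.') from by cases hc : c == '.' <;> simp_all,
        show (g == '.') = decide (g = '.') from by cases hg : g == '.' <;> simp_all]
  · have h' : ((s.length : Int) = 10) = False := by
      simp [PySem.Str.len] at hlen ⊢; omega
    simp [h']
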